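-- pv_equiv track=rewrite | github.com/juser0719/Algorithm | BOJ/사탕게임.py | check
-- ===== SOURCE A (Python) =====
-- def check(arr,s_row,e_row,s_col,e_col): # 최대 연속 캔디 구하기
--     n = len(arr)
--     res = 1
--     #행 체크
--     for i in range(s_row , e_row + 1):
--         cnt = 1
--         for j in range(1, n):
--             if arr[i][j-1] == arr[i][j] :
--                 cnt +=1
--             else:
--                 cnt = 1
--             if cnt > res:
--                 res = cnt
--
--     # 열 체크
--     for i in range(s_col,e_col+1):
--         cnt = 1
--         for j in range(1,n):
--             if arr[j-1][i] == arr[j][i]: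
--                 cnt +=1
--             else:
--                 cnt = 1
--             if cnt> res:
--                 res = cnt
--     return res
-- ===== SOURCE B (Python) =====
-- def check(arr, s_row, e_row, s_col, e_col):
--     # Change-point method: a line's longest run = the largest gap between
--     # consecutive positions where adjacent values differ.
--     n = len(arr)
--     lines = [arr[i][:n] for i in range(s_row, e_row + 1)]
--     lines += [[arr[j][i] for j in range(n)] for i in range(s_col, e_col + 1)]
--     best = 1
--     for seq in lines:
--         bounds = [0] + [k for k in range(1, n) if seq[k] != seq[k - 1]] + [n]
--         best = max(best, max(b - a for a, b in zip(bounds, bounds[1:])))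
--     return best
-- ===== Notes on version B (the rewrite author's own statement) =====
-- stated objective: alternative
-- what changed: Replaces A's per-index running counter with conditional resets by change-point detection: B lists the positions where adjacent values differ and takes the maximum gap between consecutive boundaries, over explicitly materialized row/column lines.
-- outside the precondition, e.g. on check([[5]], 1, 1, 0, 0): A returns 1, B raises IndexError; on check([[]], 0, -1, 0, 0): A returns 1, B raises IndexError
import Mathlib
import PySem

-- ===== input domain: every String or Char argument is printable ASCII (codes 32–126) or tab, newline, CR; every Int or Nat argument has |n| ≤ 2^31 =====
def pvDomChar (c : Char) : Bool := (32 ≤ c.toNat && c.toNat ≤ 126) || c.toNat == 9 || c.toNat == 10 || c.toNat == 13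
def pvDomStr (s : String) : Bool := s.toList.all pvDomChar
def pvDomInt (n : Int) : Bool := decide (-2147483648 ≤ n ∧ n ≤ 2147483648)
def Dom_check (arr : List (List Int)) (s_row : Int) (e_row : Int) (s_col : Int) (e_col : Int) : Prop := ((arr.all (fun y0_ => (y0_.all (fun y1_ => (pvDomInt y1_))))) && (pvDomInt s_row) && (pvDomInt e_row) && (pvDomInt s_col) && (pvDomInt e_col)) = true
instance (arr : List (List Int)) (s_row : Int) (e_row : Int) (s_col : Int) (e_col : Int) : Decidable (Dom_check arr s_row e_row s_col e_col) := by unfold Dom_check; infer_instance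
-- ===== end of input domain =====

-- B replaces A's running counter by change-point detection (max gap between positions
-- where adjacent values differ); same asymptotic cost, different decomposition.

-- ===== PORT A =====
def check (arr : List (List Int)) (s_row : Int) (e_row : Int) (s_col : Int) (e_col : Int) : Int :=
  let n : Int := (arr.length : Int)
  -- 행 체크 (row pass)
  let resRows : Int :=
    (PySem.List.pyRange s_row (e_row + 1) 1).foldl (fun res i =>
      ((PySem.List.pyRange 1 n 1).foldl (fun (st : Int × Int) j =>
          let cnt : Int := if PySem.List.pyGetD (PySem.List.pyGetD arr i []) (j - 1) 0 =
                              PySem.List.pyGetD (PySem.List.pyGetD arr i []) j 0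
                           then st.2 + 1 else 1
          (if cnt > st.1 then cnt else st.1, cnt)) (res, 1)).1) 1
  -- 열 체크 (column pass)
  (PySem.List.pyRange s_col (e_col + 1) 1).foldl (fun res i =>
      ((PySem.List.pyRange 1 n 1).foldl (fun (st : Int × Int) j =>
          let cnt : Int := if PySem.List.pyGetD (PySem.List.pyGetD arr (j - 1) []) i 0 =
                              PySem.List.pyGetD (PySem.List.pyGetD arr j []) i 0
                           then st.2 + 1 else 1
          (if cnt > st.1 then cnt else st.1, cnt)) (res, 1)).1) resRows

-- ===== PORT B =====
-- max(b - a for a, b in zip(bounds, bounds[1:])) over bounds = [0] + cuts + [n];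
-- the list is provably nonempty, so the .getD 0 of Python's max is never taken.
def pvBounds (n : Int) (seq : List Int) : List Int :=
  0 :: ((PySem.List.pyRange 1 n 1).filter
      (fun k => decide (PySem.List.pyGetD seq k 0 ≠ PySem.List.pyGetD seq (k - 1) 0))) ++ [n]

def pvLineMax (n : Int) (seq : List Int) : Int :=
  (PySem.List.max? (((pvBounds n seq).zip (pvBounds n seq).tail).map (fun ab => ab.2 - ab.1))
    (fun x => x)).getD 0

def check_alt (arr : List (List Int)) (s_row : Int) (e_row : Int) (s_col : Int) (e_col : Int) : Int :=
  let n : Int := (arr.length : Int)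
  let lines : List (List Int) :=
    (PySem.List.pyRange s_row (e_row + 1) 1).map
        (fun i => PySem.List.slice (PySem.List.pyGetD arr i []) none (some n))
    ++ (PySem.List.pyRange s_col (e_col + 1) 1).map
        (fun i => (PySem.List.pyRange 0 n 1).map
            (fun j => PySem.List.pyGetD (PySem.List.pyGetD arr j []) i 0))
  lines.foldl (fun best seq => max best (pvLineMax n seq)) 1

-- ===== PRECONDITION & SPEC =====
-- Pre_ admits exactly the inputs on which both programs return: it excludes the inputs where A
-- raises IndexError, plus the degenerate grids (len(arr) <= 1) whose out-of-range row bounds or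
-- (for len(arr) = 1) column bounds A never dereferences (A returns 1 there) while B's line
-- construction naturally raises on them (see cites).
def Pre_check (arr : List (List Int)) (s_row : Int) (e_row : Int) (s_col : Int) (e_col : Int) : Prop :=
  (s_row ≤ e_row → -(arr.length : Int) ≤ s_row ∧ e_row < (arr.length : Int)) ∧
  (2 ≤ arr.length → ∀ i ∈ PySem.List.pyRange s_row (e_row + 1) 1,
      (arr.length : Int) ≤ ((PySem.List.pyGetD arr i []).length : Int)) ∧
  (1 ≤ arr.length → ∀ j ∈ PySem.List.pyRange 0 (arr.length : Int) 1, s_col ≤ e_col →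
      -(((PySem.List.pyGetD arr j []).length : Int)) ≤ s_col ∧
        e_col < ((PySem.List.pyGetD arr j []).length : Int))
instance (arr : List (List Int)) (s_row : Int) (e_row : Int) (s_col : Int) (e_col : Int) : Decidable (Pre_check arr s_row e_row s_col e_col) := by unfold Pre_check; infer_instance

def pvWitness_check : List (List Int) × Int × Int × Int × Int := ([[1, 1], [2, 1]], 0, 1, 0, 1)

def Spec_check (arr : List (List Int)) (s_row : Int) (e_row : Int) (s_col : Int) (e_col : Int) (out : Int) : Prop := out = check_alt arr s_row e_row s_col e_col
instance (arr : List (List Int)) (s_row : Int) (e_row : Int) (s_col : Int) (e_col : Int) (out : Int) : Decidable (Spec_check arr s_row e_row s_col e_col out) := by unfold Spec_check; infer_instance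

-- ===== CLAIM (what is proved, stated in full; the proofs are below) =====
def Claim_equal_check : Prop := ∀ (arr : List (List Int)) (s_row : Int) (e_row : Int) (s_col : Int) (e_col : Int), Dom_check arr s_row e_row s_col e_col → Pre_check arr s_row e_row s_col e_col → Spec_check arr s_row e_row s_col e_col (check arr s_row e_row s_col e_col)

-- ===== LEMMAS AND PROOFS =====

-- abstract per-line machinery: a line is an access function g : Int → Int on indices 0..n-1
def aStep (g : Int → Int) (st : Int × Int) (j : Int) : Int × Int :=
  let cnt : Int := if g (j - 1) = g j then st.2 + 1 else 1
  (if cnt > st.1 then cnt else st.1, cnt)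

def cutsOf (g : Int → Int) (n : Int) : List Int :=
  (PySem.List.pyRange 1 n 1).filter (fun k => decide (g k ≠ g (k - 1)))

def gapsFrom (prev : Int) : List Int → Int → List Int
  | [], n => [n - prev]
  | c :: cs, n => (c - prev) :: gapsFrom c cs n

def lastOf (prev : Int) : List Int → Int
  | [] => prev
  | c :: cs => lastOf c cs

def bMaxAbs (g : Int → Int) (n : Int) : Int :=
  match gapsFrom 0 (cutsOf g n) n with
  | [] => 0
  | x :: t => t.foldl max x

lemma ifGt_eq_max (a b : Int) : (if a > b then a else b) = max b a := by
  by_cases h : b < a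
  · simp [h, max_eq_right h.le]
  · simp [h, max_eq_left (not_lt.mp h)]

lemma foldl_max_init (l : List Int) : ∀ a b : Int, List.foldl max (max a b) l = max a (List.foldl max b l) := by
  induction l with
  | nil => intro a b; rfl
  | cons c l ih => intro a b; simp only [List.foldl_cons, max_assoc, ih]

lemma gapsFrom_zip (cs : List Int) : ∀ (prev n : Int),
    (((prev :: cs ++ [n]).zip (prev :: cs ++ [n]).tail).map (fun ab => ab.2 - ab.1))
      = gapsFrom prev cs n := by
  induction cs with
  | nil => intro prev n; simp [gapsFrom]
  | cons c cs ih => intro prev n; simpa [gapsFrom] using ih c n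

lemma gapsFrom_ne_nil (prev : Int) (cs : List Int) (n : Int) : gapsFrom prev cs n ≠ [] := by
  cases cs <;> simp [gapsFrom]

lemma foldl_max_succ (cs : List Int) : ∀ (prev n r : Int),
    List.foldl max r (gapsFrom prev cs (n + 1))
      = max (List.foldl max r (gapsFrom prev cs n)) (n + 1 - lastOf prev cs) := by
  induction cs with
  | nil =>
    intro prev n r
    simp only [gapsFrom, lastOf, List.foldl_cons, List.foldl_nil]
    rw [max_assoc, max_eq_right (by omega : n - prev ≤ n + 1 - prev)]
  | cons c cs ih =>
    intro prev n r
    simp only [gapsFrom, lastOf, List.foldl_cons, ih]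

lemma gapsFrom_append_cut (cs : List Int) : ∀ (prev n : Int),
    gapsFrom prev (cs ++ [n]) (n + 1) = gapsFrom prev cs n ++ [1] := by
  induction cs with
  | nil => intro prev n; simp [gapsFrom]
  | cons c cs ih => intro prev n; simp [gapsFrom, ih]

lemma lastOf_append (cs : List Int) : ∀ (prev n : Int), lastOf prev (cs ++ [n]) = n := by
  induction cs with
  | nil => intro prev n; rfl
  | cons c cs ih => intro prev n; simpa [lastOf] using ih c n

lemma cutsOf_succ (g : Int → Int) (n : Int) (h : 1 ≤ n) :
    cutsOf g (n + 1) = cutsOf g n ++ (if g n ≠ g (n - 1) then [n] else []) := by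
  unfold cutsOf
  rw [PySem.List.pyRange_one_succ_right h, List.filter_append]
  by_cases hg : g n ≠ g (n - 1) <;> simp [hg]

-- the heart: A's counter loop over indices 1..n computes the same pair as the change-point data
lemma mainA (g : Int → Int) : ∀ (k : Nat) (res : Int), 1 ≤ res →
    (PySem.List.pyRange 1 ((k : Int) + 1) 1).foldl (aStep g) (res, 1)
      = (List.foldl max res (gapsFrom 0 (cutsOf g ((k : Int) + 1)) ((k : Int) + 1)),
         ((k : Int) + 1) - lastOf 0 (cutsOf g ((k : Int) + 1))) := by
  intro k
  induction k with
  | zero =>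
    intro res hres
    have h1 : PySem.List.pyRange 1 ((0 : Int) + 1) 1 = [] :=
      PySem.List.pyRange_one_eq_nil (by omega)
    have h2 : cutsOf g ((0 : Int) + 1) = [] := by
      unfold cutsOf; rw [h1]; rfl
    simp only [Nat.cast_zero, h1, h2, gapsFrom, lastOf, List.foldl_nil, List.foldl_cons]
    rw [max_eq_left (by omega : (0 : Int) + 1 - 0 ≤ res)]
    norm_num
  | succ k ih =>
    intro res hres
    set n : Int := (k : Int) + 1 with hn
    have hstep : PySem.List.pyRange 1 (n + 1) 1 = PySem.List.pyRange 1 n 1 ++ [n] :=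
      PySem.List.pyRange_one_succ_right (by omega)
    have hgoalcast : ((k + 1 : Nat) : Int) + 1 = n + 1 := by rw [hn]; push_cast; ring
    rw [hgoalcast, hstep, List.foldl_append, ih res hres]
    have hcuts := cutsOf_succ g n (by omega)
    by_cases hg : g (n - 1) = g n
    · have hcs : cutsOf g (n + 1) = cutsOf g n := by
        rw [hcuts]; simp [hg]
      rw [hcs]
      conv_rhs => rw [foldl_max_succ]
      simp only [List.foldl_cons, List.foldl_nil, aStep, hg, ifGt_eq_max, if_pos,
        Prod.mk.injEq]
      constructor
      · congr 1; omega
      · omega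
    · have hgn : g n ≠ g (n - 1) := fun h => hg h.symm
      have hcs : cutsOf g (n + 1) = cutsOf g n ++ [n] := by
        rw [hcuts]; simp [hgn]
      rw [hcs, gapsFrom_append_cut, lastOf_append, List.foldl_append]
      simp only [List.foldl_cons, List.foldl_nil, aStep, hg, if_false, ifGt_eq_max]
      rw [Prod.mk.injEq]
      constructor
      · rfl
      · omega

-- per-line, A side
lemma lineA (g : Int → Int) (n res : Int) (hres : 1 ≤ res) :
    ((PySem.List.pyRange 1 n 1).foldl (aStep g) (res, 1)).1 = max res (bMaxAbs g n) := by
  by_cases hn : 1 ≤ n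
  · obtain ⟨k, hk⟩ : ∃ k : Nat, n = (k : Int) + 1 := ⟨(n - 1).toNat, by omega⟩
    subst hk
    rw [mainA g k res hres]
    unfold bMaxAbs
    cases hgl : gapsFrom 0 (cutsOf g ((k : Int) + 1)) ((k : Int) + 1) with
    | nil => exact absurd hgl (gapsFrom_ne_nil _ _ _)
    | cons x t =>
      show List.foldl max res (x :: t) = max res (List.foldl max x t)
      simp only [List.foldl_cons]
      exact foldl_max_init t res x
  · have h1 : PySem.List.pyRange 1 n 1 = [] := PySem.List.pyRange_one_eq_nil (by omega)
    have h2 : cutsOf g n = [] := by unfold cutsOf; rw [h1]; rfl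
    unfold bMaxAbs
    rw [h1, h2]
    simp only [gapsFrom, List.foldl_nil]
    rw [max_eq_left (by omega : n - 0 ≤ res)]

-- per-line, B side
lemma lineB (n : Int) (seq : List Int) (g : Int → Int)
    (h : ∀ k : Int, 0 ≤ k → k < n → PySem.List.pyGetD seq k 0 = g k) :
    pvLineMax n seq = bMaxAbs g n := by
  have hfilter : (PySem.List.pyRange 1 n 1).filter
      (fun k => decide (PySem.List.pyGetD seq k 0 ≠ PySem.List.pyGetD seq (k - 1) 0))
      = cutsOf g n := by
    unfold cutsOf
    apply List.filter_congr
    intro k hk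
    have hk' := (PySem.List.mem_pyRange_one).1 hk
    rw [h k (by omega) (by omega), h (k - 1) (by omega) (by omega)]
  unfold pvLineMax pvBounds
  rw [hfilter, gapsFrom_zip (cutsOf g n) 0 n]
  unfold bMaxAbs
  cases hgl : gapsFrom 0 (cutsOf g n) n with
  | nil => exact absurd hgl (gapsFrom_ne_nil _ _ _)
  | cons x t => rw [PySem.List.max?_id_cons]; rfl

-- fold congruence under the invariant 1 ≤ res
lemma foldl_line (l : List Int) (F : Int → Int → Int) (V : Int → Int)
    (h : ∀ r i, 1 ≤ r → i ∈ l → F r i = max r (V i)) :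
    ∀ r : Int, 1 ≤ r → l.foldl F r = l.foldl (fun r i => max r (V i)) r := by
  induction l with
  | nil => intro r _; rfl
  | cons c l ih =>
    intro r hr
    simp only [List.foldl_cons]
    rw [h r c hr (by simp)]
    exact ih (fun r i hr hi => h r i hr (by simp [hi])) _ (le_trans hr (le_max_left _ _))

-- ===== VERDICT (by name: the statement is the Claim_ definition above) =====
theorem check_spec : Claim_equal_check := by
  intro arr s_row e_row s_col e_col _ hpre
  obtain ⟨hrowb, hrowlen, _⟩ := hpre
  unfold Spec_check check check_alt
  simp only [List.foldl_append, List.foldl_map]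
  -- inside Pre_, the sliced row seen by B reads the same entries A reads
  have hrowline : ∀ i : Int, i ∈ PySem.List.pyRange s_row (e_row + 1) 1 →
      ∀ k : Int, 0 ≤ k → k < (arr.length : Int) →
      PySem.List.pyGetD (PySem.List.slice (PySem.List.pyGetD arr i []) none (some (arr.length : Int))) k 0
        = PySem.List.pyGetD (PySem.List.pyGetD arr i []) k 0 := by
    intro i hi k hk0 hkn
    rw [PySem.List.slice_to _ (by omega)]
    by_cases h2 : 2 ≤ arr.length
    · have hlr := hrowlen h2 i hi
      rw [PySem.List.pyGetD_eq_getElem _ 0 hk0 (by simp [List.length_take]; omega),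
          PySem.List.pyGetD_eq_getElem _ 0 hk0 (by omega)]
      exact List.getElem_take
    · have hN : arr.length = 1 := by omega
      have hk : k = 0 := by omega
      subst hk
      rw [PySem.List.pyGetD_zero, PySem.List.pyGetD_zero]
      generalize PySem.List.pyGetD arr i [] = row
      cases row with
      | nil => simp
      | cons a t => simp [hN]
  -- the row pass of A equals the row part of B's fold
  have hrowsA := foldl_line (PySem.List.pyRange s_row (e_row + 1) 1)
      (fun res i =>
        ((PySem.List.pyRange 1 (arr.length : Int) 1).foldl
          (aStep (fun k => PySem.List.pyGetD (PySem.List.pyGetD arr i []) k 0)) (res, 1)).1)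
      (fun i => bMaxAbs (fun k => PySem.List.pyGetD (PySem.List.pyGetD arr i []) k 0) (arr.length : Int))
      (fun r i hr _ => lineA _ _ r hr) 1 le_rfl
  have hrowsB := foldl_line (PySem.List.pyRange s_row (e_row + 1) 1)
      (fun best i => max best (pvLineMax (arr.length : Int)
          (PySem.List.slice (PySem.List.pyGetD arr i []) none (some (arr.length : Int)))))
      (fun i => bMaxAbs (fun k => PySem.List.pyGetD (PySem.List.pyGetD arr i []) k 0) (arr.length : Int))
      (fun r i hr hi => by simp only [lineB _ _ _ (hrowline i hi)]) 1 le_rfl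
  have hrows := hrowsA.trans hrowsB.symm
  -- B's row-stage value is ≥ 1, the invariant the column stage needs
  have hXge : (1 : Int) ≤ (PySem.List.pyRange s_row (e_row + 1) 1).foldl
      (fun best i => max best (pvLineMax (arr.length : Int)
          (PySem.List.slice (PySem.List.pyGetD arr i []) none (some (arr.length : Int))))) 1 :=
    (PySem.List.le_foldl_max_int _
      (fun i => pvLineMax (arr.length : Int)
          (PySem.List.slice (PySem.List.pyGetD arr i []) none (some (arr.length : Int)))) 1).1
  -- column pass, A side then B side, both to the abstract fold
  have hcolA := foldl_line (PySem.List.pyRange s_col (e_col + 1) 1)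
      (fun res i =>
        ((PySem.List.pyRange 1 (arr.length : Int) 1).foldl
          (aStep (fun j => PySem.List.pyGetD (PySem.List.pyGetD arr j []) i 0)) (res, 1)).1)
      (fun i => bMaxAbs (fun j => PySem.List.pyGetD (PySem.List.pyGetD arr j []) i 0) (arr.length : Int))
      (fun r i hr _ => lineA _ _ r hr)
      ((PySem.List.pyRange s_row (e_row + 1) 1).foldl
        (fun best i => max best (pvLineMax (arr.length : Int)
            (PySem.List.slice (PySem.List.pyGetD arr i []) none (some (arr.length : Int))))) 1)
      hXge
  have hcolB := foldl_line (PySem.List.pyRange s_col (e_col + 1) 1)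
      (fun best i => max best (pvLineMax (arr.length : Int)
          ((PySem.List.pyRange 0 (arr.length : Int) 1).map
            (fun j => PySem.List.pyGetD (PySem.List.pyGetD arr j []) i 0))))
      (fun i => bMaxAbs (fun j => PySem.List.pyGetD (PySem.List.pyGetD arr j []) i 0) (arr.length : Int))
      (fun r i hr _ => by
        simp only [lineB _ _ (fun j => PySem.List.pyGetD (PySem.List.pyGetD arr j []) i 0)
          (fun k hk0 hkn => PySem.List.pyGetD_map_pyRange_of_nonneg _ _ k 0 hk0 hkn)])
      ((PySem.List.pyRange s_row (e_row + 1) 1).foldl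
        (fun best i => max best (pvLineMax (arr.length : Int)
            (PySem.List.slice (PySem.List.pyGetD arr i []) none (some (arr.length : Int))))) 1)
      hXge
  calc (PySem.List.pyRange s_col (e_col + 1) 1).foldl
        (fun res i =>
          ((PySem.List.pyRange 1 (arr.length : Int) 1).foldl
            (aStep (fun j => PySem.List.pyGetD (PySem.List.pyGetD arr j []) i 0)) (res, 1)).1)
        ((PySem.List.pyRange s_row (e_row + 1) 1).foldl
          (fun res i =>
            ((PySem.List.pyRange 1 (arr.length : Int) 1).foldl
              (aStep (fun k => PySem.List.pyGetD (PySem.List.pyGetD arr i []) k 0)) (res, 1)).1) 1)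
      = (PySem.List.pyRange s_col (e_col + 1) 1).foldl
        (fun res i =>
          ((PySem.List.pyRange 1 (arr.length : Int) 1).foldl
            (aStep (fun j => PySem.List.pyGetD (PySem.List.pyGetD arr j []) i 0)) (res, 1)).1)
        ((PySem.List.pyRange s_row (e_row + 1) 1).foldl
          (fun best i => max best (pvLineMax (arr.length : Int)
              (PySem.List.slice (PySem.List.pyGetD arr i []) none (some (arr.length : Int))))) 1) := by
        rw [hrows]
    _ = _ := hcolA.trans hcolB.symm
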